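-- pv_equiv track=rewrite | github.com/jali-k/ghost-mark | ghost_mark/pdf_app/utils.py | _clean_font_name
-- ===== SOURCE A (Python) =====
-- def _clean_font_name(font_name):
--     """
--     EXACT function from simplified_font_analyzer.py
--     Clean up font name by removing technical suffixes
--     """
--     # Remove common technical suffixes
--     suffixes_to_remove = ["+", "-Bold", "-Italic", "-BoldItalic", "-Regular"]
--
--     clean_name = font_name
--     for suffix in suffixes_to_remove:
--         if suffix in clean_name:
--             clean_name = clean_name.split(suffix)[0]
--
--     # Remove everything after the first '+' (common in PDF font names)
--     if "+" in clean_name: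
--         clean_name = clean_name.split("+")[1] if "+" in clean_name else clean_name
--
--     return clean_name.strip()
-- ===== SOURCE B (Python) =====
-- def _clean_font_name(font_name):
--     """Clean up font name by removing technical suffixes (single cut at the
--     leftmost suffix occurrence instead of repeated split passes)."""
--     suffixes_to_remove = ["+", "-Bold", "-Italic", "-BoldItalic", "-Regular"]
--     cut = len(font_name)
--     for suffix in suffixes_to_remove:
--         if suffix in font_name:
--             cut = min(cut, font_name.index(suffix))
--     return font_name[:cut].strip()
-- ===== Notes on version B (the rewrite author's own statement) =====
-- stated objective: simpler
-- what changed: Replaces A's sequential split-and-reassign passes (plus a dead '+' block) by computing one minimal cut index over all suffix occurrences in the original string and slicing once.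
import Mathlib
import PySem

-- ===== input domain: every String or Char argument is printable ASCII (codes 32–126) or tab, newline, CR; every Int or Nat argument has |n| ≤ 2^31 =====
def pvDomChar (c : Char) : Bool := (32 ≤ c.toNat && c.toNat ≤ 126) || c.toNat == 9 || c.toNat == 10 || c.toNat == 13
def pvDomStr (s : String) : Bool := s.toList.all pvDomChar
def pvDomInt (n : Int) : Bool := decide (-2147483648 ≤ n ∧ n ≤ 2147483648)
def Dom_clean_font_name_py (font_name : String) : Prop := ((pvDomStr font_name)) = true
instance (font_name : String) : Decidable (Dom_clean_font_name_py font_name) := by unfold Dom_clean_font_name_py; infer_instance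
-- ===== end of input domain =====

-- B replaces A's sequential split-and-reassign passes (and A's dead '+' block) by one
-- minimal cut index over all suffix occurrences in the original string and a single slice.

-- ===== PORT A =====
-- suffixes_to_remove = ["+", "-Bold", "-Italic", "-BoldItalic", "-Regular"]
def pvSuffixes : List String := ["+", "-Bold", "-Italic", "-BoldItalic", "-Regular"]

def clean_font_name_py (font_name : String) : String :=
  -- for suffix in suffixes_to_remove: if suffix in clean_name: clean_name = clean_name.split(suffix)[0]
  -- (each sep is a non-empty literal, so .split never raises; split always returns ≥ 1 part, so [0] never raises)
  let clean_name := pvSuffixes.foldl (fun clean_name suffix =>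
    if PySem.Str.isIn suffix clean_name then
      String.ofList ((PySem.Chars.splitOn clean_name.toList suffix.toList).headD [])
    else clean_name) font_name
  -- if "+" in clean_name: clean_name = clean_name.split("+")[1] if "+" in clean_name else clean_name
  -- ("+" in clean_name guarantees split("+") has ≥ 2 parts, so [1] never raises)
  let clean_name := if PySem.Str.isIn "+" clean_name then
      (if PySem.Str.isIn "+" clean_name then
        String.ofList (((PySem.Chars.splitOn clean_name.toList "+".toList).drop 1).headD [])
      else clean_name)
    else clean_name
  PySem.Str.strip clean_name

-- ===== PORT B =====
def clean_font_name_py_alt (font_name : String) : String :=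
  -- cut = len(font_name); for suffix …: if suffix in font_name: cut = min(cut, font_name.index(suffix))
  let cut := pvSuffixes.foldl (fun cut suffix =>
    if PySem.Str.isIn suffix font_name then
      min cut (PySem.Str.find font_name suffix)
    else cut) (PySem.Str.len font_name)
  -- return font_name[:cut].strip()
  PySem.Str.strip (PySem.Str.slice font_name none (some cut))

-- ===== PRECONDITION & SPEC =====
def Spec_clean_font_name_py (font_name : String) (out : String) : Prop := out = clean_font_name_py_alt font_name
instance (font_name : String) (out : String) : Decidable (Spec_clean_font_name_py font_name out) := by unfold Spec_clean_font_name_py; infer_instance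

-- ===== CLAIM (what is proved, stated in full; the proofs are below) =====
def Claim_equal_clean_font_name_py : Prop := ∀ (font_name : String), Dom_clean_font_name_py font_name → Spec_clean_font_name_py font_name (clean_font_name_py font_name)

-- ===== LEMMAS AND PROOFS =====

-- length of the prefix of l before the first occurrence of sep (l.length if none)
def pvCut (sep : List Char) : List Char → Nat
  | [] => 0
  | c :: rest => if sep.isPrefixOf (c :: rest) then 0 else pvCut sep rest + 1

lemma pvCut_prefix (sep l : List Char) (hsep : sep ≠ []) (h : sep <:+: l) :
    sep <+: l.drop (pvCut sep l) := by
  induction l with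
  | nil => simp [List.infix_nil] at h; exact absurd h hsep
  | cons c rest ih =>
    simp only [pvCut]
    split
    · next hp => simpa using List.isPrefixOf_iff_prefix.mp hp
    · next hp =>
      rcases List.infix_cons_iff.mp h with h1 | h1
      · exact absurd (List.isPrefixOf_iff_prefix.mpr h1) (by simp [hp])
      · simpa using ih h1

lemma pvCut_min (sep l : List Char) : ∀ j < pvCut sep l, ¬ sep <+: l.drop j := by
  induction l with
  | nil => simp [pvCut]
  | cons c rest ih =>
    simp only [pvCut]
    split
    · simp
    · next hp =>
      intro j hj
      cases j with
      | zero => simpa using fun hpre => hp (List.isPrefixOf_iff_prefix.mpr hpre)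
      | succ j => simpa using ih j (by omega)

lemma pvCut_not_found (sep l : List Char) (hsep : sep ≠ []) (h : ¬ sep <:+: l) :
    pvCut sep l = l.length := by
  induction l with
  | nil => simp [pvCut]
  | cons c rest ih =>
    simp only [pvCut]
    split
    · next hp => exact absurd ((List.isPrefixOf_iff_prefix.mp hp).isInfix) h
    · next hp =>
      have : ¬ sep <:+: rest := fun hr => h (List.infix_cons hr)
      simp [ih this]

lemma pvCut_eq_of (sep l : List Char) (i : Nat) (hsep : sep ≠ [])
    (hocc : sep <+: l.drop i) (hmin : ∀ j < i, ¬ sep <+: l.drop j) :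
    pvCut sep l = i := by
  have hin : sep <:+: l := hocc.isInfix.trans (List.drop_suffix i l).isInfix
  rcases Nat.lt_trichotomy (pvCut sep l) i with h | h | h
  · exact absurd (pvCut_prefix sep l hsep hin) (hmin _ h)
  · exact h
  · exact absurd hocc (pvCut_min sep l i h)

lemma pvFind_eq_pvCut (sep l : List Char) (hsep : sep ≠ []) (h : sep <:+: l) :
    PySem.Chars.find l sep = (pvCut sep l : Int) := by
  have h0 : 0 ≤ PySem.Chars.find l sep := (PySem.Chars.find_nonneg_iff _ _).mpr h
  obtain ⟨hocc, hmin⟩ := PySem.Chars.find_spec h0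
  have := pvCut_eq_of sep l (PySem.Chars.find l sep).toNat hsep hocc hmin
  omega

-- headD of splitOn.go once something is in the accumulator
lemma pvGo_head_acc (sep : List Char) (fuel : Nat) :
    ∀ (l cur : List Char) (as_ : List (List Char)) (a : List Char),
    (PySem.Chars.splitOn.go sep fuel l cur (as_ ++ [a])).headD [] = a := by
  induction fuel with
  | zero =>
    intro l cur as_ a
    simp [PySem.Chars.splitOn.go]
  | succ fuel ih =>
    intro l cur as_ a
    cases l with
    | nil => simp [PySem.Chars.splitOn.go]
    | cons c rest =>
      rw [PySem.Chars.splitOn.go]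
      split
      · have : PySem.Chars.splitOn.go sep fuel ((c :: rest).drop sep.length) []
            (cur.reverse :: (as_ ++ [a])) =
            PySem.Chars.splitOn.go sep fuel ((c :: rest).drop sep.length) []
            ((cur.reverse :: as_) ++ [a]) := by simp
        rw [this, ih]
      · exact ih rest (c :: cur) as_ a

lemma pvGo_head (sep : List Char) (hsep : sep ≠ []) :
    ∀ (fuel : Nat) (l cur : List Char), l.length < fuel →
    (PySem.Chars.splitOn.go sep fuel l cur []).headD [] = cur.reverse ++ l.take (pvCut sep l) := by
  intro fuel
  induction fuel with
  | zero => intro l cur h; omega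
  | succ fuel ih =>
    intro l cur h
    cases l with
    | nil => simp [PySem.Chars.splitOn.go, pvCut]
    | cons c rest =>
      rw [PySem.Chars.splitOn.go]
      split
      · next hp =>
        have := pvGo_head_acc sep fuel ((c :: rest).drop sep.length) [] [] cur.reverse
        simp only [List.nil_append] at this
        rw [this]
        simp [pvCut, hp]
      · next hp =>
        rw [ih rest (c :: cur) (by simp at h ⊢; omega)]
        simp [pvCut, hp, List.take_succ_cons]

lemma pvSplitOn_head (sep l : List Char) (hsep : sep ≠ []) :
    (PySem.Chars.splitOn l sep).headD [] = l.take (pvCut sep l) := by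
  have := pvGo_head sep hsep (l.length + 1) l [] (by omega)
  simpa [PySem.Chars.splitOn] using this

-- occurrence inside a take
lemma pvOcc_take_iff (sep l : List Char) (hsep : sep ≠ []) (k j : Nat) :
    sep <+: (l.take k).drop j ↔ sep <+: l.drop j ∧ j + sep.length ≤ k := by
  rw [List.drop_take, List.prefix_take_iff]
  have : 1 ≤ sep.length := List.length_pos_of_ne_nil hsep
  constructor
  · rintro ⟨h1, h2⟩; exact ⟨h1, by omega⟩
  · rintro ⟨h1, h2⟩; exact ⟨h1, by omega⟩

-- chars-level step of A's loop
def pvStepA (c s : List Char) : List Char :=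
  if PySem.Chars.isIn s c then (PySem.Chars.splitOn c s).headD [] else c

-- a "good" suffix: non-empty, starts with '+' or '-', no '+'/'-' after position 0
abbrev pvGood (s : List Char) : Prop :=
  s ≠ [] ∧ (s[0]? = some '+' ∨ s[0]? = some '-') ∧
    (s.drop 1).all (fun c => c ≠ '+' && c ≠ '-') = true

-- invariant: the running cut k is l.length or sits on a '+'/'-' character of l
def pvP (l : List Char) (k : Nat) : Prop :=
  k ≤ l.length ∧ (k = l.length ∨ l[k]? = some '+' ∨ l[k]? = some '-')

def pvK (l : List Char) (k : Nat) (s : List Char) : Nat := min k (pvCut s l)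

-- a prefix of a drop pins down the characters of l
lemma pvOcc_getElem (s l : List Char) (i j : Nat) (hocc : s <+: l.drop i)
    (hj : j < s.length) : l[i + j]? = s[j]? := by
  obtain ⟨t, ht⟩ := hocc
  rw [← List.getElem?_drop, ← ht, List.getElem?_append_left hj]

lemma pvStep_eq (l s : List Char) (k : Nat) (hs : pvGood s) (hP : pvP l k) :
    pvStepA (l.take k) s = l.take (pvK l k s) ∧ pvP l (pvK l k s) := by
  obtain ⟨hk, hPor⟩ := hP
  obtain ⟨hsne, hc0, hrest⟩ := hs
  have hslen : 1 ≤ s.length := List.length_pos_of_ne_nil hsne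
  by_cases hcase : s <:+: l ∧ pvCut s l < k
  · obtain ⟨hin, hilt⟩ := hcase
    set i := pvCut s l with hi
    have hocc : s <+: l.drop i := pvCut_prefix s l hsne hin
    have hil : i + s.length ≤ l.length := by
      have := hocc.length_le
      simp [List.length_drop] at this
      omega
    have hik : i + s.length ≤ k := by
      by_contra hcon
      push_neg at hcon
      have hkl : k < l.length := by omega
      have hknl : k ≠ l.length := by omega
      have hch : l[k]? = s[k - i]? := by
        have := pvOcc_getElem s l i (k - i) hocc (by omega)
        rwa [Nat.add_sub_cancel' (by omega)] at this
      have hmem : ∀ c, s[k - i]? = some c → c ≠ '+' ∧ c ≠ '-' := by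
        intro c hc
        have h1 : (s.drop 1)[k - i - 1]? = some c := by
          rw [List.getElem?_drop]
          rwa [Nat.add_sub_cancel' (by omega)]
        have := List.all_eq_true.mp hrest c (List.mem_of_getElem? h1)
        simp at this
        exact this
      rcases hPor with h | h | h
      · omega
      · have := hmem '+' (by rw [← hch]; exact h); tauto
      · have := hmem '-' (by rw [← hch]; exact h); tauto
    have hocc' : s <+: (l.take k).drop i := (pvOcc_take_iff s l hsne k i).mpr ⟨hocc, hik⟩
    have hmin' : ∀ j < i, ¬ s <+: (l.take k).drop j := fun j hj hpre =>
      pvCut_min s l j hj ((pvOcc_take_iff s l hsne k j).mp hpre).1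
    have hcutTk : pvCut s (l.take k) = i := pvCut_eq_of s (l.take k) i hsne hocc' hmin'
    have hinTk : PySem.Chars.isIn s (l.take k) = true :=
      (PySem.Chars.exists_prefix_drop_iff_isIn _ _).mp ⟨i, hocc'⟩
    have hKi : pvK l k s = i := by simp [pvK]; omega
    refine ⟨?_, ?_⟩
    · rw [pvStepA, hinTk, if_pos rfl, pvSplitOn_head s (l.take k) hsne, hcutTk, hKi,
        List.take_take]
      congr 1
      omega
    · refine ⟨by rw [hKi]; omega, Or.inr ?_⟩
      have h0 : l[i]? = s[0]? := by simpa using pvOcc_getElem s l i 0 hocc (by omega)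
      rw [hKi, h0]
      exact hc0
  · have hge : k ≤ pvCut s l := by
      by_cases hin : s <:+: l
      · push_neg at hcase
        have := hcase hin
        omega
      · rw [pvCut_not_found s l hsne hin]; exact hk
    have hinTk : PySem.Chars.isIn s (l.take k) = false := by
      cases hb : PySem.Chars.isIn s (l.take k) with
      | false => rfl
      | true =>
        exfalso
        obtain ⟨j, hj⟩ := (PySem.Chars.exists_prefix_drop_iff_isIn _ _).mpr hb
        obtain ⟨hj1, hj2⟩ := (pvOcc_take_iff s l hsne k j).mp hj
        exact pvCut_min s l j (by omega) hj1
    have hKk : pvK l k s = k := by simp [pvK]; omega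
    rw [hKk]
    exact ⟨by simp [pvStepA, hinTk], hk, hPor⟩

-- B's loop step computes the same running minimum
lemma pvStepB_eq (l s : List Char) (k : Nat) (hsne : s ≠ []) (hk : k ≤ l.length) :
    (if PySem.Chars.isIn s l then min (k : Int) (PySem.Chars.find l s) else (k : Int)) =
    ((pvK l k s : Nat) : Int) := by
  by_cases hin : s <:+: l
  · rw [if_pos ((PySem.Chars.isIn_iff_infix _ _).mpr hin), pvFind_eq_pvCut s l hsne hin]
    simp [pvK]
  · have hf := (PySem.Chars.isIn_eq_false_iff s l).mpr hin
    rw [if_neg (by simp [hf])]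
    have := pvCut_not_found s l hsne hin
    simp [pvK]
    omega

-- the combined fold facts for A's loop and B's loop
lemma pvFold (ss : List (List Char)) (h : ∀ s ∈ ss, pvGood s) (l : List Char) :
    ∀ (k : Nat), pvP l k →
    ss.foldl pvStepA (l.take k) = l.take (ss.foldl (pvK l) k) ∧
    pvP l (ss.foldl (pvK l) k) ∧ ss.foldl (pvK l) k ≤ k ∧
    ss.foldl (fun cut s => if PySem.Chars.isIn s l then min cut (PySem.Chars.find l s) else cut)
      (k : Int) = ((ss.foldl (pvK l) k : Nat) : Int) := by
  induction ss with
  | nil => intro k hP; exact ⟨rfl, hP, le_refl _, rfl⟩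
  | cons s t ih =>
    intro k hP
    have hs := h s (by simp)
    have ht : ∀ x ∈ t, pvGood x := fun x hx => h x (by simp [hx])
    obtain ⟨hstep, hP'⟩ := pvStep_eq l s k hs hP
    obtain ⟨ih1, ih2, ih3, ih4⟩ := ih ht (pvK l k s) hP'
    refine ⟨?_, ih2, ?_, ?_⟩
    · rw [List.foldl_cons, hstep, List.foldl_cons]
      exact ih1
    · rw [List.foldl_cons]
      exact le_trans ih3 (min_le_left _ _)
    · rw [List.foldl_cons, pvStepB_eq l s k hs.1 hP.1, List.foldl_cons]
      exact ih4

-- ===== VERDICT (by name: the statement is the Claim_ definition above) =====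
theorem clean_font_name_py_spec : Claim_equal_clean_font_name_py := by
  intro font_name _
  unfold Spec_clean_font_name_py clean_font_name_py clean_font_name_py_alt
  dsimp only
  set l := font_name.toList with hl
  have hgood : ∀ s ∈ pvSuffixes.map String.toList, pvGood s := by decide
  have hP0 : pvP l l.length := ⟨le_refl _, Or.inl rfl⟩
  obtain ⟨hA, hPK, _, hB⟩ := pvFold (pvSuffixes.map String.toList) hgood l l.length hP0
  rw [List.take_length] at hA
  set K := List.foldl (pvK l) l.length (pvSuffixes.map String.toList) with hK
  set fld := List.foldl (fun clean_name suffix =>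
      if PySem.Str.isIn suffix clean_name then
        String.ofList ((PySem.Chars.splitOn clean_name.toList suffix.toList).headD [])
      else clean_name) font_name pvSuffixes with hfld
  -- A's string-level loop, moved to the chars level
  have hcomm : ∀ (x y : String),
      pvStepA x.toList y.toList = (if PySem.Str.isIn y x then
        String.ofList ((PySem.Chars.splitOn x.toList y.toList).headD []) else x).toList := by
    intro x y
    by_cases hin : PySem.Chars.isIn y.toList x.toList = true
    · simp [pvStepA, PySem.Str.isIn, hin]
    · simp [pvStepA, PySem.Str.isIn, hin]
  have hfoldA : fld.toList = l.take K := by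
    rw [hfld, ← hA, List.foldl_map]
    exact (List.foldl_hom String.toList hcomm).symm
  -- no '+' survives A's loop
  have hKplus : K ≤ pvCut ['+'] l := by
    have h1 : pvSuffixes.map String.toList =
        ['+'] :: (["-Bold", "-Italic", "-BoldItalic", "-Regular"].map String.toList) := by decide
    rw [hK, h1, List.foldl_cons]
    have hP1 : pvP l (pvK l l.length ['+']) :=
      (pvStep_eq l ['+'] l.length (by decide) hP0).2
    have h3 := (pvFold (["-Bold", "-Italic", "-BoldItalic", "-Regular"].map String.toList)
      (by decide) l (pvK l l.length ['+']) hP1).2.2.1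
    have h2 : pvK l l.length ['+'] ≤ pvCut ['+'] l := min_le_right _ _
    omega
  have habs : PySem.Chars.isIn ['+'] (l.take K) = false := by
    rw [PySem.Chars.isIn_eq_false_iff]
    intro hcon
    obtain ⟨j, hj⟩ := (PySem.Chars.exists_prefix_drop_iff_isIn _ _).mpr
      ((PySem.Chars.isIn_iff_infix _ _).mpr hcon)
    obtain ⟨hj1, hj2⟩ := (pvOcc_take_iff ['+'] l (by decide) K j).mp hj
    simp at hj2
    exact pvCut_min ['+'] l j (by omega) hj1
  have hplus : PySem.Str.isIn "+" fld = false := by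
    unfold PySem.Str.isIn
    rw [hfoldA, show ("+" : String).toList = ['+'] from by decide]
    exact habs
  rw [if_neg (by rw [hplus]; exact Bool.false_ne_true)]
  -- B's cut is K
  have hcut : (List.foldl (fun cut suffix =>
      if PySem.Str.isIn suffix font_name then min cut (PySem.Str.find font_name suffix)
      else cut) (PySem.Str.len font_name) pvSuffixes) = ((K : Nat) : Int) := by
    rw [← hB, List.foldl_map]
    rfl
  rw [hcut]
  -- both sides strip the same character list
  refine String.toList_inj.mp ?_
  rw [PySem.Str.toList_strip, PySem.Str.toList_strip, hfoldA, PySem.Str.toList_slice,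
    PySem.Chars.slice_eq_listSlice, PySem.List.slice_to_natCast]
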